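-- pv_equiv track=rewrite | github.com/Semal31/Gedcom-parser-group1 | parser.py | names_are_unique
-- ===== SOURCE A (Python) =====
-- def names_are_unique(individuals: dict) -> bool:
--     """Implements user story 23, checking if all people born on the same day have unique names.
--         Author: Ryan Hartman
--         Last Modified: 4/12/2021
--
--     Args:
--         individuals (dict): A dict of individuals to check
--
--     Returns:
--         bool: True if all people born on the same day are unique, false otherwise.
--
--     Runtime:
--         Ω(1) (when the first individual is an offending case)
--         Θ(n)
--         O(n)
--     """
--     people = {}
--     for individual in individuals.values():
--         birth_date = individual.get("DATE")
--         name = individual.get("NAME")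
--         if name in people:
--             if birth_date in people[name]:
--                 return False
--             else:
--                 people[name].add(birth_date)
--         else:
--             people[name] = {birth_date}
--     return True
-- ===== SOURCE B (Python) =====
-- def names_are_unique(individuals: dict) -> bool:
--     """Brute-force pairwise rewrite: read all (name, birth_date) pairs once, then
--     compare every pair of positions directly -- no dict, no set, no hashing."""
--     pairs = [(ind.get("NAME"), ind.get("DATE")) for ind in individuals.values()]
--     return all(pairs[i] != pairs[j]
--                for i in range(len(pairs))
--                for j in range(i + 1, len(pairs)))
-- ===== Notes on version B (the rewrite author's own statement) =====
-- stated objective: alternative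
-- what changed: Replaces the hash-based incremental dict-of-sets with early exit by a hash-free brute-force check: one pass collects all (name, birth_date) pairs, then every pair of positions is compared directly with nested index ranges.
import Mathlib
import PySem

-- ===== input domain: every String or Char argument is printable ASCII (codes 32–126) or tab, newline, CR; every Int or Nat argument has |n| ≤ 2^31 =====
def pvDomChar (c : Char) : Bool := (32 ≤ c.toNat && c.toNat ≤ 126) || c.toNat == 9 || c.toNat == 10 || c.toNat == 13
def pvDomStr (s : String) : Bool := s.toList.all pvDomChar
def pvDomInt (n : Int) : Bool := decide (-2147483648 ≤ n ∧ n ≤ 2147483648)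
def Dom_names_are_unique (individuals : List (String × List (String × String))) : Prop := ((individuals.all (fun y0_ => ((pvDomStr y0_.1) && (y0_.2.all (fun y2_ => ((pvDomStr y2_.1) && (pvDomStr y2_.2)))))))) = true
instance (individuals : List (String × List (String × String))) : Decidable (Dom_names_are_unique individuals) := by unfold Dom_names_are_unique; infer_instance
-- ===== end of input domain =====

-- B replaces A's hash-based incremental dict-of-sets with early exit by a hash-free brute-force
-- check: collect all (name, birth_date) pairs, then compare every pair of index positions.

-- ===== PORT A =====
-- the loop 'for individual in individuals.values(): …' with its early 'return False'
def naLoopA (vals : List (List (String × String))) (people : PySem.Dict (Option String) (PySem.Set (Option String))) : Bool :=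
  match vals with
  | [] => true
  | ind :: rest =>
    let d := PySem.Dict.ofList ind
    let birth_date := d.get? "DATE"
    let name := d.get? "NAME"
    if people.contains name then
      if PySem.Set.contains (people.getD name []) birth_date then
        false
      else
        naLoopA rest (people.insert name (PySem.Set.add (people.getD name []) birth_date))
    else
      naLoopA rest (people.insert name (PySem.Set.ofList [birth_date]))

def names_are_unique (individuals : List (String × List (String × String))) : Bool :=
  naLoopA (PySem.Dict.ofList individuals).values PySem.Dict.empty

-- ===== PORT B =====
-- 'all(pairs[i] != pairs[j] for i in range(len(pairs)) for j in range(i+1, len(pairs)))'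
def names_are_unique_alt (individuals : List (String × List (String × String))) : Bool :=
  let pairs := (PySem.Dict.ofList individuals).values.map
    (fun ind => ((PySem.Dict.ofList ind).get? "NAME", (PySem.Dict.ofList ind).get? "DATE"))
  (PySem.List.pyRange 0 pairs.length 1).all (fun i =>
    (PySem.List.pyRange (i + 1) pairs.length 1).all (fun j =>
      PySem.List.pyGetD pairs i (none, none) != PySem.List.pyGetD pairs j (none, none)))

-- ===== PRECONDITION & SPEC =====
def Spec_names_are_unique (individuals : List (String × List (String × String))) (out : Bool) : Prop := out = names_are_unique_alt individuals
instance (individuals : List (String × List (String × String))) (out : Bool) : Decidable (Spec_names_are_unique individuals out) := by unfold Spec_names_are_unique; infer_instance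

-- ===== CLAIM (what is proved, stated in full; the proofs are below) =====
def Claim_equal_names_are_unique : Prop := ∀ (individuals : List (String × List (String × String))), Dom_names_are_unique individuals → Spec_names_are_unique individuals (names_are_unique individuals)

-- ===== LEMMAS AND PROOFS =====

-- the (name, birth_date) pair read off one individual, shared by both characterisations
def naKey (ind : List (String × String)) : Option String × Option String :=
  ((PySem.Dict.ofList ind).get? "NAME", (PySem.Dict.ofList ind).get? "DATE")

-- one step of A's loop, as pure logic over the lookup functions before/after the update
theorem naStep_iff {α β : Type} [DecidableEq α] [DecidableEq β] (n : α) (b : β)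
    (ks : List (α × β)) (g g' : α → List β)
    (hgn : ∀ p2 : β, p2 ∈ g' n ↔ p2 ∈ g n ∨ p2 = b)
    (hne : ∀ a : α, a ≠ n → g' a = g a)
    (hb : b ∉ g n) :
    (((n, b) :: ks).Nodup ∧ ∀ p ∈ (n, b) :: ks, p.2 ∉ g p.1) ↔
      (ks.Nodup ∧ ∀ p ∈ ks, p.2 ∉ g' p.1) := by
  rw [List.nodup_cons]
  simp only [List.forall_mem_cons]
  constructor
  · rintro ⟨⟨hnot, hnd⟩, -, hall⟩
    refine ⟨hnd, ?_⟩
    rintro ⟨a, c⟩ hp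
    by_cases han : a = n
    · subst han
      rw [hgn]
      rintro (h1 | rfl)
      · exact hall ⟨a, c⟩ hp h1
      · exact hnot hp
    · rw [hne a han]
      exact hall ⟨a, c⟩ hp
  · rintro ⟨hnd, hall⟩
    refine ⟨⟨?_, hnd⟩, hb, ?_⟩
    · intro hmem
      exact hall (n, b) hmem ((hgn b).mpr (Or.inr rfl))
    · rintro ⟨a, c⟩ hp
      by_cases han : a = n
      · subst han
        intro h1
        exact hall ⟨a, c⟩ hp ((hgn c).mpr (Or.inl h1))
      · rw [← hne a han]
        exact hall ⟨a, c⟩ hp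

-- A's loop returns True exactly when the keys so far are fresh and pairwise distinct
theorem naLoopA_eq (vals : List (List (String × String)))
    (people : PySem.Dict (Option String) (PySem.Set (Option String)))
    (hnd : people.keys.Nodup) :
    naLoopA vals people =
      decide ((vals.map naKey).Nodup ∧
        ∀ p ∈ vals.map naKey, p.2 ∉ people.getD p.1 []) := by
  induction vals generalizing people with
  | nil => simp [naLoopA]
  | cons ind rest ih =>
    simp only [naLoopA, List.map_cons]
    set n := (PySem.Dict.ofList ind).get? "NAME" with hn
    set b := (PySem.Dict.ofList ind).get? "DATE" with hb
    have hkey : naKey ind = (n, b) := rfl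
    simp only [hkey]
    by_cases hc : people.contains n
    · simp only [hc, if_true]
      by_cases hm : b ∈ people.getD n []
      · rw [if_pos (by simpa [PySem.Set.contains_iff] using hm)]
        symm
        simp only [decide_eq_false_iff_not]
        rintro ⟨-, hall⟩
        exact hall (n, b) (by simp) hm
      · rw [if_neg (by simpa [PySem.Set.contains_iff] using hm)]
        rw [ih _ (PySem.Dict.nodup_keys_insert _ _ _ hnd), decide_eq_decide]
        exact (naStep_iff n b (rest.map naKey)
          (fun a => people.getD a [])
          (fun a => (people.insert n (PySem.Set.add (people.getD n []) b)).getD a [])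
          (fun p2 => by simp [PySem.Set.mem_add])
          (fun a ha => by simp [PySem.Dict.getD_insert, ha]) hm).symm
    · simp only [hc, if_false, Bool.false_eq_true]
      rw [ih _ (PySem.Dict.nodup_keys_insert _ _ _ hnd), decide_eq_decide]
      have hget : people.getD n [] = [] :=
        PySem.Dict.getD_of_not_contains _ _ (by simpa using hc)
      have hsingle : PySem.Set.ofList [b] = [b] :=
        PySem.Set.ofList_eq_self_of_nodup _ (by simp)
      exact (naStep_iff n b (rest.map naKey)
        (fun a => people.getD a [])
        (fun a => (people.insert n (PySem.Set.ofList [b])).getD a [])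
        (fun p2 => by simp [hsingle, hget])
        (fun a ha => by simp [PySem.Dict.getD_insert, ha]) (by simp [hget])).symm

-- B's nested index ranges decide Nodup of the pair list
theorem naBrute_eq {α : Type} [BEq α] [LawfulBEq α] [DecidableEq α] (xs : List α) (d : α) :
    ((PySem.List.pyRange 0 xs.length 1).all (fun i =>
      (PySem.List.pyRange (i + 1) xs.length 1).all (fun j =>
        PySem.List.pyGetD xs i d != PySem.List.pyGetD xs j d))) = decide xs.Nodup := by
  rw [Bool.eq_iff_iff, List.all_eq_true, decide_eq_true_iff, List.Nodup,
    List.pairwise_iff_getElem]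
  constructor
  · intro h i j hi hj hij
    have h1 := h (i : Int) (by rw [PySem.List.mem_pyRange_one]; omega)
    rw [List.all_eq_true] at h1
    have h2 := h1 (j : Int) (by rw [PySem.List.mem_pyRange_one]; omega)
    rw [PySem.List.pyGetD_natCast xs i d, PySem.List.pyGetD_natCast xs j d,
      List.getD_eq_getElem xs d hi, List.getD_eq_getElem xs d hj] at h2
    simpa using h2
  · intro hx i hi
    rw [List.all_eq_true]
    intro j hj
    rw [PySem.List.mem_pyRange_one] at hi hj
    have hi' : i.toNat < xs.length := by omega
    have hj' : j.toNat < xs.length := by omega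
    have hci : i = (i.toNat : Int) := by omega
    have hcj : j = (j.toNat : Int) := by omega
    rw [hci, hcj, PySem.List.pyGetD_natCast xs i.toNat d, PySem.List.pyGetD_natCast xs j.toNat d,
      List.getD_eq_getElem xs d hi', List.getD_eq_getElem xs d hj']
    simpa using hx i.toNat j.toNat hi' hj' (by omega)

-- ===== VERDICT (by name: the statement is the Claim_ definition above) =====
theorem names_are_unique_spec : Claim_equal_names_are_unique := by
  intro individuals _
  unfold Spec_names_are_unique names_are_unique names_are_unique_alt
  rw [naLoopA_eq _ _ PySem.Dict.nodup_keys_empty]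
  simp only [PySem.Dict.getD_empty, List.not_mem_nil, not_false_iff, implies_true, and_true]
  exact (naBrute_eq ((PySem.Dict.ofList individuals).values.map naKey) (none, none)).symm
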